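-- pv_equiv track=rewrite | github.com/mirror-look/mirror-look-origin | flask-server/modules_for_app/clothes_for_weather.py | recommend_clothes
-- ===== SOURCE A (Python) =====
-- from collections import defaultdict
--
-- clothes_for_recommend = {
--     'top': {
--         5: ["두꺼운 니트", "히트택"],
--         9: ["두꺼운 니트"],
--         11: ["니트", "후드티"],
--         12: ["셔츠", '니트', "후드티"],
--         17: ["얇은 니트", "얇은 후드티", "맨투맨"],
--         20: ["긴팔티", "얇은 후드티"],
--         23: ["반팔티", "얇은 셔츠"],
--         27: ["반팔티", "나시티", "민소매"],
--     },
--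
--     'outwear': {
--         5: ["야상", "패딩"],
--         9: ["코트"],
--         11: ["트렌치 코트", "간절기 야상"],
--         12: ["자켓", "가디건", "간절기 야상"],
--         17: ["가디건"],
--         20: ["얇은 가디건"],
--         23: ["여름용 가디건"],
--         27: ["여름용 가디건"],
--     },
--
--     'bottom': {
--         5: ["두꺼운 바지", "히트택"],
--         9: ["청바지"],
--         11: ["청바지"],
--         12: ["살색 스타킹", "청바지"],
--         17: ["청바지", "면바지", "슬렉스"],
--         20: ["면바지", "슬랙스", "스키니"],
--         23: ["반바지", "면바지"],
--         27: ["반바지"],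
--     },
--
--     'dress': {
--         5: ["겨울용 원피스", "히트택"],
--         9: ["두꺼운 원피스"],
--         11: ["두꺼운 원피스"],
--         12: ["원피스"],
--         17: ["원피스"],
--         20: ["얇은 원피스"],
--         23: ["반팔 원피스"],
--         27: ["민소매 원피스"],
--     }
-- }
--
-- def recommend_clothes(temperature, categories):
--     recommended_clothes_by_category = defaultdict()
--
--     for category in categories:
--         for temperature_range in clothes_for_recommend[category]:
--             if temperature > temperature_range:
--                 continue
--             else:
--                 recommended_clothes_by_category[category] = clothes_for_recommend[category][temperature_range]
--                 break
--
--     return recommended_clothes_by_category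
-- ===== SOURCE B (Python) =====
-- # B: compute the temperature band index once (all four categories share the same
-- # thresholds), then each category is a direct index into an 8-row list.
-- from collections import defaultdict
--
-- TEMPERATURE_BANDS = [5, 9, 11, 12, 17, 20, 23, 27]
--
-- RECOMMENDATIONS = {
--     'top': [
--         ["두꺼운 니트", "히트택"],
--         ["두꺼운 니트"],
--         ["니트", "후드티"],
--         ["셔츠", '니트', "후드티"],
--         ["얇은 니트", "얇은 후드티", "맨투맨"],
--         ["긴팔티", "얇은 후드티"],
--         ["반팔티", "얇은 셔츠"],
--         ["반팔티", "나시티", "민소매"],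
--     ],
--     'outwear': [
--         ["야상", "패딩"],
--         ["코트"],
--         ["트렌치 코트", "간절기 야상"],
--         ["자켓", "가디건", "간절기 야상"],
--         ["가디건"],
--         ["얇은 가디건"],
--         ["여름용 가디건"],
--         ["여름용 가디건"],
--     ],
--     'bottom': [
--         ["두꺼운 바지", "히트택"],
--         ["청바지"],
--         ["청바지"],
--         ["살색 스타킹", "청바지"],
--         ["청바지", "면바지", "슬렉스"],
--         ["면바지", "슬랙스", "스키니"],
--         ["반바지", "면바지"],
--         ["반바지"],
--     ],
--     'dress': [
--         ["겨울용 원피스", "히트택"],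
--         ["두꺼운 원피스"],
--         ["두꺼운 원피스"],
--         ["원피스"],
--         ["원피스"],
--         ["얇은 원피스"],
--         ["반팔 원피스"],
--         ["민소매 원피스"],
--     ],
-- }
--
-- def recommend_clothes(temperature, categories):
--     band = next((i for i, limit in enumerate(TEMPERATURE_BANDS) if temperature <= limit), None)
--     recommended = defaultdict()
--     for category in categories:
--         rows = RECOMMENDATIONS[category]
--         if band is not None:
--             recommended[category] = rows[band]
--     return recommended
-- ===== Notes on version B (the rewrite author's own statement) =====
-- stated objective: alternative
-- what changed: B computes the temperature band index once up front by scanning the shared threshold list, then each category becomes a single direct index into an 8-row list, replacing A's per-category continue/break scan over per-category threshold dicts.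
import Mathlib
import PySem

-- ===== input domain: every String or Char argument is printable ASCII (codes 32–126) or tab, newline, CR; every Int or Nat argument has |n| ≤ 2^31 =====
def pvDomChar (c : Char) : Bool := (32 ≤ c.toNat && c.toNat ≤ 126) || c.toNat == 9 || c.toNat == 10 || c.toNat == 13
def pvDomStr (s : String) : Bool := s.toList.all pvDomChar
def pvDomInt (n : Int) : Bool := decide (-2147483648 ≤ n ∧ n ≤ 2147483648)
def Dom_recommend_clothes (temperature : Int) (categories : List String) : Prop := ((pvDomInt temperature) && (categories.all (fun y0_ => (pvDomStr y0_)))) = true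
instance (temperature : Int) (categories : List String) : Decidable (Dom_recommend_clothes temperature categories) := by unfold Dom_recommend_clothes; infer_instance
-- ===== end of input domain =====

-- B computes the temperature band index once (the four categories share the same
-- thresholds) and indexes each category's 8-row list directly, instead of A's
-- per-category continue/break scan over threshold dicts (objective: alternative).


-- ===== PORT A =====
-- A's module-level constant clothes_for_recommend: dict of per-category threshold dicts
def clothesTable : PySem.Dict String (PySem.Dict Int (List String)) :=
  PySem.Dict.mk
    [("top", PySem.Dict.mk
        [(5, ["두꺼운 니트", "히트택"]), (9, ["두꺼운 니트"]), (11, ["니트", "후드티"]),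
         (12, ["셔츠", "니트", "후드티"]), (17, ["얇은 니트", "얇은 후드티", "맨투맨"]),
         (20, ["긴팔티", "얇은 후드티"]), (23, ["반팔티", "얇은 셔츠"]), (27, ["반팔티", "나시티", "민소매"])]),
     ("outwear", PySem.Dict.mk
        [(5, ["야상", "패딩"]), (9, ["코트"]), (11, ["트렌치 코트", "간절기 야상"]),
         (12, ["자켓", "가디건", "간절기 야상"]), (17, ["가디건"]),
         (20, ["얇은 가디건"]), (23, ["여름용 가디건"]), (27, ["여름용 가디건"])]),
     ("bottom", PySem.Dict.mk
        [(5, ["두꺼운 바지", "히트택"]), (9, ["청바지"]), (11, ["청바지"]),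
         (12, ["살색 스타킹", "청바지"]), (17, ["청바지", "면바지", "슬렉스"]),
         (20, ["면바지", "슬랙스", "스키니"]), (23, ["반바지", "면바지"]), (27, ["반바지"])]),
     ("dress", PySem.Dict.mk
        [(5, ["겨울용 원피스", "히트택"]), (9, ["두꺼운 원피스"]), (11, ["두꺼운 원피스"]),
         (12, ["원피스"]), (17, ["원피스"]), (20, ["얇은 원피스"]), (23, ["반팔 원피스"]), (27, ["민소매 원피스"])])]

-- inner loop of A: 'for temperature_range in …: if temperature > …: continue else: … break'
def recAInner (temperature : Int) : List (Int × List String) → Option (List String)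
  | [] => none
  | (k, v) :: rest => if temperature > k then recAInner temperature rest else some v

-- body of A's outer 'for category in categories' loop
def recAStep (temperature : Int) (d : PySem.Dict String (List String)) (category : String) :
    PySem.Dict String (List String) :=
  match clothesTable.get? category with
  | none => d  -- Python: KeyError (excluded by Pre_)
  | some table =>
    match recAInner temperature table.items with
    | some v => d.insert category v
    | none => d

def recommend_clothes (temperature : Int) (categories : List String) : List (String × List String) :=
  (categories.foldl (recAStep temperature) PySem.Dict.empty).items

-- ===== PORT B =====
-- B's module-level constants: the shared threshold list and per-category row lists
def temperatureBands : List Int := [5, 9, 11, 12, 17, 20, 23, 27]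

def recommendations : PySem.Dict String (List (List String)) :=
  PySem.Dict.mk
    [("top",
       [["두꺼운 니트", "히트택"], ["두꺼운 니트"], ["니트", "후드티"], ["셔츠", "니트", "후드티"],
        ["얇은 니트", "얇은 후드티", "맨투맨"], ["긴팔티", "얇은 후드티"], ["반팔티", "얇은 셔츠"],
        ["반팔티", "나시티", "민소매"]]),
     ("outwear",
       [["야상", "패딩"], ["코트"], ["트렌치 코트", "간절기 야상"], ["자켓", "가디건", "간절기 야상"],
        ["가디건"], ["얇은 가디건"], ["여름용 가디건"], ["여름용 가디건"]]),
     ("bottom",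
       [["두꺼운 바지", "히트택"], ["청바지"], ["청바지"], ["살색 스타킹", "청바지"],
        ["청바지", "면바지", "슬렉스"], ["면바지", "슬랙스", "스키니"], ["반바지", "면바지"], ["반바지"]]),
     ("dress",
       [["겨울용 원피스", "히트택"], ["두꺼운 원피스"], ["두꺼운 원피스"], ["원피스"],
        ["원피스"], ["얇은 원피스"], ["반팔 원피스"], ["민소매 원피스"]])]

-- port of 'next((i for i, limit in enumerate(TEMPERATURE_BANDS) if temperature <= limit), None)'
def bandScan (temperature : Int) (i : Nat) : List Int → Option Nat
  | [] => none
  | limit :: rest => if temperature ≤ limit then some i else bandScan temperature (i + 1) rest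

-- body of B's 'for category in categories' loop
def recBStep (band : Option Nat) (d : PySem.Dict String (List String)) (category : String) :
    PySem.Dict String (List String) :=
  match recommendations.get? category with
  | none => d  -- Python: KeyError (excluded by Pre_)
  | some rows =>
    match band with
    | none => d
    | some i => d.insert category (rows.getD i [])  -- rows[i], always in range (i < 8)

def recommend_clothes_alt (temperature : Int) (categories : List String) : List (String × List String) :=
  (categories.foldl (recBStep (bandScan temperature 0 temperatureBands)) PySem.Dict.empty).items

-- ===== PRECONDITION & SPEC =====
-- Pre_ excludes only categories that are not among the four table keys, on which A raises KeyError.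
def Pre_recommend_clothes (temperature : Int) (categories : List String) : Prop :=
  categories.all (fun c => ["top", "outwear", "bottom", "dress"].contains c) = true
instance (temperature : Int) (categories : List String) : Decidable (Pre_recommend_clothes temperature categories) := by unfold Pre_recommend_clothes; infer_instance

def pvWitness_recommend_clothes : Int × List String := (10, ["top", "dress", "outwear"])

def Spec_recommend_clothes (temperature : Int) (categories : List String) (out : List (String × List String)) : Prop := out = recommend_clothes_alt temperature categories
instance (temperature : Int) (categories : List String) (out : List (String × List String)) : Decidable (Spec_recommend_clothes temperature categories out) := by unfold Spec_recommend_clothes; infer_instance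

-- ===== CLAIM (what is proved, stated in full; the proofs are below) =====
def Claim_equal_recommend_clothes : Prop := ∀ (temperature : Int) (categories : List String), Dom_recommend_clothes temperature categories → Pre_recommend_clothes temperature categories → Spec_recommend_clothes temperature categories (recommend_clothes temperature categories)

-- ===== LEMMAS AND PROOFS =====

-- A's inner scan over a threshold dict with the shared keys equals B's band scan
-- followed by indexing the list of values.
lemma recAInner_bands (t : Int) (v0 v1 v2 v3 v4 v5 v6 v7 : List String) :
    recAInner t [(5, v0), (9, v1), (11, v2), (12, v3), (17, v4), (20, v5), (23, v6), (27, v7)] =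
      (bandScan t 0 temperatureBands).map
        (fun i => [v0, v1, v2, v3, v4, v5, v6, v7].getD i []) := by
  simp only [temperatureBands, recAInner, bandScan]
  by_cases h1 : t ≤ 5
  · rw [if_neg (by omega : ¬ t > 5), if_pos h1]; rfl
  rw [if_pos (by omega : t > 5), if_neg h1]
  by_cases h2 : t ≤ 9
  · rw [if_neg (by omega : ¬ t > 9), if_pos h2]; rfl
  rw [if_pos (by omega : t > 9), if_neg h2]
  by_cases h3 : t ≤ 11
  · rw [if_neg (by omega : ¬ t > 11), if_pos h3]; rfl
  rw [if_pos (by omega : t > 11), if_neg h3]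
  by_cases h4 : t ≤ 12
  · rw [if_neg (by omega : ¬ t > 12), if_pos h4]; rfl
  rw [if_pos (by omega : t > 12), if_neg h4]
  by_cases h5 : t ≤ 17
  · rw [if_neg (by omega : ¬ t > 17), if_pos h5]; rfl
  rw [if_pos (by omega : t > 17), if_neg h5]
  by_cases h6 : t ≤ 20
  · rw [if_neg (by omega : ¬ t > 20), if_pos h6]; rfl
  rw [if_pos (by omega : t > 20), if_neg h6]
  by_cases h7 : t ≤ 23
  · rw [if_neg (by omega : ¬ t > 23), if_pos h7]; rfl
  rw [if_pos (by omega : t > 23), if_neg h7]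
  by_cases h8 : t ≤ 27
  · rw [if_neg (by omega : ¬ t > 27), if_pos h8]; rfl
  rw [if_pos (by omega : t > 27), if_neg h8]; rfl

-- For each of the four valid categories, one outer-loop step of A equals one of B.
lemma step_eq (t : Int) (d : PySem.Dict String (List String)) (c : String)
    (hc : c = "top" ∨ c = "outwear" ∨ c = "bottom" ∨ c = "dress") :
    recAStep t d c = recBStep (bandScan t 0 temperatureBands) d c := by
  rcases hc with h | h | h | h <;> subst h <;>
    (simp only [recAStep, recBStep, clothesTable, recommendations,
       PySem.Dict.get?, List.find?, String.reduceBEq]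
     norm_num
     rw [recAInner_bands]
     cases bandScan t 0 temperatureBands <;> simp)

-- ===== VERDICT (by name: the statement is the Claim_ definition above) =====
theorem recommend_clothes_spec : Claim_equal_recommend_clothes := by
  intro t cats _hdom hpre
  unfold Spec_recommend_clothes recommend_clothes recommend_clothes_alt
  have h : ∀ (acc : PySem.Dict String (List String)), ∀ x ∈ cats,
      recAStep t acc x = recBStep (bandScan t 0 temperatureBands) acc x := by
    intro acc x hx
    have hp := List.all_eq_true.mp hpre x hx
    exact step_eq t acc x (by simpa using hp)
  rw [PySem.List.foldl_congr_mem cats (recAStep t) (recBStep (bandScan t 0 temperatureBands))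
    PySem.Dict.empty h]
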